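-- pv_equiv track=rewrite | github.com/phyto99/sphero-ros | simple_sphero_web.py | categorize_command
-- ===== SOURCE A (Python) =====
-- def categorize_command(name: str) -> str:
--     """Categorize commands"""
--     name_lower = name.lower()
--
--     if any(word in name_lower for word in ['led', 'light', 'color']):
--         return 'LEDs'
--     elif any(word in name_lower for word in ['matrix', 'frame', 'pixel', 'animation', 'compressed']):
--         return 'Matrix/Animation'
--     elif any(word in name_lower for word in ['drive', 'roll', 'spin', 'move', 'heading']):
--         return 'Movement'
--     elif any(word in name_lower for word in ['sensor', 'gyro', 'accel', 'magnet', 'stream']):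
--         return 'Sensors'
--     elif any(word in name_lower for word in ['collision', 'notify', 'listener', 'event']):
--         return 'Events'
--     elif any(word in name_lower for word in ['config', 'set', 'get', 'enable', 'disable']):
--         return 'Configuration'
--     elif any(word in name_lower for word in ['sound', 'audio', 'speaker']):
--         return 'Audio'
--     elif any(word in name_lower for word in ['power', 'battery', 'sleep', 'wake']):
--         return 'Power'
--     else:
--         return 'Other'
-- ===== SOURCE B (Python) =====
-- # Inverted index: each keyword maps to (priority, category); one argmin scan
-- # over all keywords replaces the ordered elif chain.
-- _KEYWORD_INDEX = {
--     'led': (0, 'LEDs'), 'light': (0, 'LEDs'), 'color': (0, 'LEDs'),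
--     'matrix': (1, 'Matrix/Animation'), 'frame': (1, 'Matrix/Animation'),
--     'pixel': (1, 'Matrix/Animation'), 'animation': (1, 'Matrix/Animation'),
--     'compressed': (1, 'Matrix/Animation'),
--     'drive': (2, 'Movement'), 'roll': (2, 'Movement'), 'spin': (2, 'Movement'),
--     'move': (2, 'Movement'), 'heading': (2, 'Movement'),
--     'sensor': (3, 'Sensors'), 'gyro': (3, 'Sensors'), 'accel': (3, 'Sensors'),
--     'magnet': (3, 'Sensors'), 'stream': (3, 'Sensors'),
--     'collision': (4, 'Events'), 'notify': (4, 'Events'),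
--     'listener': (4, 'Events'), 'event': (4, 'Events'),
--     'config': (5, 'Configuration'), 'set': (5, 'Configuration'),
--     'get': (5, 'Configuration'), 'enable': (5, 'Configuration'),
--     'disable': (5, 'Configuration'),
--     'sound': (6, 'Audio'), 'audio': (6, 'Audio'), 'speaker': (6, 'Audio'),
--     'power': (7, 'Power'), 'battery': (7, 'Power'), 'sleep': (7, 'Power'),
--     'wake': (7, 'Power'),
-- }
--
-- def categorize_command(name: str) -> str:
--     """Categorize commands: best (lowest-priority) matching keyword wins."""
--     name_lower = name.lower()
--     best = None
--     for kw, (prio, cat) in _KEYWORD_INDEX.items():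
--         if kw in name_lower and (best is None or prio < best[0]):
--             best = (prio, cat)
--     return best[1] if best is not None else 'Other'
-- ===== Notes on version B (the rewrite author's own statement) =====
-- stated objective: alternative
-- what changed: Replaces the ordered elif chain of per-category any() searches with an inverted keyword->(priority,category) index scanned once, keeping the minimum-priority matching keyword (argmin aggregation instead of first-match early return).
import Mathlib
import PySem

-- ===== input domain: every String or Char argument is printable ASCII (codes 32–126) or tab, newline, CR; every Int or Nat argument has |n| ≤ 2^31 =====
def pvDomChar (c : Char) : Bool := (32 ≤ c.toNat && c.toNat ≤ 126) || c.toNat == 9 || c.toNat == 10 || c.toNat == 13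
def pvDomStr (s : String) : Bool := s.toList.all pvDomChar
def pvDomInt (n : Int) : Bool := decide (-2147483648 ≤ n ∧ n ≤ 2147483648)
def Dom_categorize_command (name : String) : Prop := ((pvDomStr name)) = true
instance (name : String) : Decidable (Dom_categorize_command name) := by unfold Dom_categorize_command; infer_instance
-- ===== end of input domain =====

-- B replaces A's ordered elif chain with an inverted keyword->(priority,category) index
-- scanned once, keeping the minimum-priority matching keyword (alternative; same cost).

-- ===== PORT A =====
def categorize_command (name : String) : String :=
  let name_lower := PySem.Str.lower name
  if ["led", "light", "color"].any (fun word => PySem.Str.isIn word name_lower) then "LEDs"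
  else if ["matrix", "frame", "pixel", "animation", "compressed"].any (fun word => PySem.Str.isIn word name_lower) then "Matrix/Animation"
  else if ["drive", "roll", "spin", "move", "heading"].any (fun word => PySem.Str.isIn word name_lower) then "Movement"
  else if ["sensor", "gyro", "accel", "magnet", "stream"].any (fun word => PySem.Str.isIn word name_lower) then "Sensors"
  else if ["collision", "notify", "listener", "event"].any (fun word => PySem.Str.isIn word name_lower) then "Events"
  else if ["config", "set", "get", "enable", "disable"].any (fun word => PySem.Str.isIn word name_lower) then "Configuration"
  else if ["sound", "audio", "speaker"].any (fun word => PySem.Str.isIn word name_lower) then "Audio"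
  else if ["power", "battery", "sleep", "wake"].any (fun word => PySem.Str.isIn word name_lower) then "Power"
  else "Other"

-- ===== PORT B =====
-- the flat keyword -> (priority, category) dict, in insertion order
def pvKeywordIndex : List (String × Nat × String) :=
  [ ("led", 0, "LEDs"), ("light", 0, "LEDs"), ("color", 0, "LEDs"),
    ("matrix", 1, "Matrix/Animation"), ("frame", 1, "Matrix/Animation"),
    ("pixel", 1, "Matrix/Animation"), ("animation", 1, "Matrix/Animation"),
    ("compressed", 1, "Matrix/Animation"),
    ("drive", 2, "Movement"), ("roll", 2, "Movement"), ("spin", 2, "Movement"),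
    ("move", 2, "Movement"), ("heading", 2, "Movement"),
    ("sensor", 3, "Sensors"), ("gyro", 3, "Sensors"), ("accel", 3, "Sensors"),
    ("magnet", 3, "Sensors"), ("stream", 3, "Sensors"),
    ("collision", 4, "Events"), ("notify", 4, "Events"),
    ("listener", 4, "Events"), ("event", 4, "Events"),
    ("config", 5, "Configuration"), ("set", 5, "Configuration"),
    ("get", 5, "Configuration"), ("enable", 5, "Configuration"),
    ("disable", 5, "Configuration"),
    ("sound", 6, "Audio"), ("audio", 6, "Audio"), ("speaker", 6, "Audio"),
    ("power", 7, "Power"), ("battery", 7, "Power"), ("sleep", 7, "Power"),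
    ("wake", 7, "Power") ]

-- one iteration of the argmin loop: 'if kw in name_lower and (best is None or prio < best[0]): best = (prio, cat)'
def pvStep (name_lower : String) (best : Option (Nat × String)) (p : String × Nat × String) : Option (Nat × String) :=
  if PySem.Str.isIn p.1 name_lower &&
      (match best with | none => true | some b => decide (p.2.1 < b.1)) then
    some (p.2.1, p.2.2)
  else best

def categorize_command_alt (name : String) : String :=
  let name_lower := PySem.Str.lower name
  match pvKeywordIndex.foldl (pvStep name_lower) none with
  | some b => b.2
  | none => "Other"

-- ===== PRECONDITION & SPEC =====
def Spec_categorize_command (name : String) (out : String) : Prop := out = categorize_command_alt name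
instance (name : String) (out : String) : Decidable (Spec_categorize_command name out) := by unfold Spec_categorize_command; infer_instance

-- ===== CLAIM (what is proved, stated in full; the proofs are below) =====
def Claim_equal_categorize_command : Prop := ∀ (name : String), Dom_categorize_command name → Spec_categorize_command name (categorize_command name)

-- ===== LEMMAS AND PROOFS =====

-- a segment of the index with one fixed priority/category
def pvSeg (ws : List String) (j : Nat) (cat : String) : List (String × Nat × String) :=
  ws.map (fun w => (w, j, cat))

-- the index grouped into its per-category segments
def pvSegTable : List (List String × Nat × String) :=
  [ (["led", "light", "color"], 0, "LEDs"),
    (["matrix", "frame", "pixel", "animation", "compressed"], 1, "Matrix/Animation"),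
    (["drive", "roll", "spin", "move", "heading"], 2, "Movement"),
    (["sensor", "gyro", "accel", "magnet", "stream"], 3, "Sensors"),
    (["collision", "notify", "listener", "event"], 4, "Events"),
    (["config", "set", "get", "enable", "disable"], 5, "Configuration"),
    (["sound", "audio", "speaker"], 6, "Audio"),
    (["power", "battery", "sleep", "wake"], 7, "Power") ]

lemma pvIndex_eq_flat :
    pvKeywordIndex = pvSegTable.flatMap (fun t => pvSeg t.1 t.2.1 t.2.2) := by
  rfl

-- first segment with a matching keyword
def pvFirstMatch (s : String) : List (List String × Nat × String) → Option (Nat × String)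
  | [] => none
  | (ws, j, cat) :: rest =>
      if ws.any (fun w => PySem.Str.isIn w s) then some (j, cat)
      else pvFirstMatch s rest

lemma fold_seg_some (s : String) (ws : List String) (j : Nat) (cat : String)
    (b : Nat × String) (h : b.1 ≤ j) :
    List.foldl (pvStep s) (some b) (pvSeg ws j cat) = some b := by
  induction ws with
  | nil => rfl
  | cons w ws ih =>
    have hlt : decide (j < b.1) = false := by simp [Nat.not_lt.mpr h]
    have hstep : pvStep s (some b) (w, j, cat) = some b := by
      simp only [pvStep, hlt, Bool.and_false, Bool.false_eq_true, if_false]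
    simp only [pvSeg, List.map_cons, List.foldl_cons, hstep]
    simpa [pvSeg] using ih

lemma fold_seg_none (s : String) (ws : List String) (j : Nat) (cat : String) :
    List.foldl (pvStep s) none (pvSeg ws j cat) =
      if ws.any (fun w => PySem.Str.isIn w s) then some (j, cat) else none := by
  induction ws with
  | nil => rfl
  | cons w ws ih =>
    cases h : PySem.Str.isIn w s with
    | true =>
      have hstep : pvStep s none (w, j, cat) = some (j, cat) := by
        simp only [pvStep, h]; rfl
      simp only [pvSeg, List.map_cons, List.foldl_cons, hstep]
      rw [show (List.map (fun w => (w, j, cat)) ws) = pvSeg ws j cat from rfl,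
          fold_seg_some s ws j cat (j, cat) (le_refl j)]
      simp only [List.any_cons, h, Bool.true_or, if_true]
    | false =>
      have hstep : pvStep s none (w, j, cat) = none := by
        simp only [pvStep, h]; rfl
      simp only [pvSeg, List.map_cons, List.foldl_cons, hstep]
      rw [show (List.map (fun w => (w, j, cat)) ws) = pvSeg ws j cat from rfl, ih]
      simp only [List.any_cons, h, Bool.false_or]

lemma fold_flat_some (s : String) (b : Nat × String)
    (segs : List (List String × Nat × String)) (h : ∀ t ∈ segs, b.1 ≤ t.2.1) :
    List.foldl (pvStep s) (some b) (segs.flatMap (fun t => pvSeg t.1 t.2.1 t.2.2)) = some b := by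
  induction segs with
  | nil => rfl
  | cons t rest ih =>
    simp only [List.flatMap_cons, List.foldl_append]
    rw [fold_seg_some s t.1 t.2.1 t.2.2 b (h t (List.mem_cons_self))]
    exact ih (fun u hu => h u (List.mem_cons_of_mem _ hu))

lemma fold_flat_none (s : String) (segs : List (List String × Nat × String))
    (hp : segs.Pairwise (fun a b => a.2.1 ≤ b.2.1)) :
    List.foldl (pvStep s) none (segs.flatMap (fun t => pvSeg t.1 t.2.1 t.2.2)) =
      pvFirstMatch s segs := by
  induction segs with
  | nil => rfl
  | cons t rest ih =>
    obtain ⟨ht, hrest⟩ := List.pairwise_cons.mp hp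
    obtain ⟨ws, j, cat⟩ := t
    simp only [List.flatMap_cons, List.foldl_append, fold_seg_none]
    cases h : ws.any (fun w => PySem.Str.isIn w s) with
    | true =>
      rw [if_pos rfl, fold_flat_some s (j, cat) rest (fun u hu => ht u hu)]
      simp only [pvFirstMatch, h, if_true]
    | false =>
      rw [if_neg (by simp), ih hrest]
      simp only [pvFirstMatch, h, Bool.false_eq_true, if_false]

-- ===== VERDICT (by name: the statement is the Claim_ definition above) =====
theorem categorize_command_spec : Claim_equal_categorize_command := by
  intro name _
  unfold Spec_categorize_command categorize_command categorize_command_alt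
  dsimp only
  rw [pvIndex_eq_flat, fold_flat_none _ _ (by decide)]
  simp only [pvSegTable, pvFirstMatch]
  split_ifs <;> rfl
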